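-- pv_equiv track=rewrite | github.com/virtualnerd2/WikiProject | main.py | removeParenthesis
-- ===== SOURCE A (Python) =====
-- def removeParenthesis(pageText):
-- 	pageText = pageText[1:]
-- 	start = 1
-- 	end = 0
--
-- 	for i in range(len(pageText)):
-- 		if(pageText[i:i+1] == "("):
-- 			start = start + 1
--
-- 		elif(pageText[i:i+1] == ")"):
-- 			end = end + 1
--
-- 		if(end == start):
-- 			return pageText[i+1:]
-- ===== SOURCE B (Python) =====
-- def removeParenthesis(pageText):
--     s = pageText[1:]
--     # running balance after each char, starting from 1 (the stripped first char)
--     balances = []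
--     bal = 1
--     for c in s:
--         bal += (c == '(') - (c == ')')
--         balances.append(bal)
--     for i, b in enumerate(balances):
--         if b == 0:
--             return s[i + 1:]
--     return None
-- ===== Notes on version B (the rewrite author's own statement) =====
-- stated objective: alternative
-- what changed: B materialises the full running-balance table of the sliced text and then scans it for the first zero, instead of A's fused counter loop with start/end counters and an early return.
-- outside the precondition, e.g. on removeParenthesis('abc'): A returns None, B returns None
import Mathlib
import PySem

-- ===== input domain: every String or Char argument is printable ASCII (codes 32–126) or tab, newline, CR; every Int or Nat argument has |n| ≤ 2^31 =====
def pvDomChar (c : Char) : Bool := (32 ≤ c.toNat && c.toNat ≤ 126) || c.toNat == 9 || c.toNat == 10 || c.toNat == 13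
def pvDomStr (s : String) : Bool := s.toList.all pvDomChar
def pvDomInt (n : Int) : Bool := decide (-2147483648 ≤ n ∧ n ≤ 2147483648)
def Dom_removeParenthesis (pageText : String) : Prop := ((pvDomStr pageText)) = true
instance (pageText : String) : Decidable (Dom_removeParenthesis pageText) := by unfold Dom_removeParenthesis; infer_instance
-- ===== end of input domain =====

-- B builds the full running-balance table of the sliced text and scans it for the first zero,
-- instead of A's fused start/end counter loop with an early return (objective: alternative decomposition).


-- ===== PORT A =====
-- the for-loop over range(len(pageText)) with the start/end counters and the early return;
-- `pageText[i:i+1] == "("` on an in-range i is a one-char test on the i-th char; the early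
-- return value pageText[i+1:] is the rest of the list after the current char.
def goA : List Char → Int → Int → Option (List Char)
  | [], _, _ => none
  | c :: rest, start, fin =>
    let start' := if c = '(' then start + 1 else start
    let fin' := if c ≠ '(' ∧ c = ')' then fin + 1 else fin
    if fin' = start' then some rest else goA rest start' fin'

def removeParenthesis (pageText : String) : String :=
  -- pageText[1:] on a string is exactly dropping the first character
  match goA (pageText.toList.drop 1) 1 0 with
  | some l => String.mk l
  | none => ""   -- Python A falls off the loop and returns None here; excluded by Pre_

-- ===== PORT B =====
-- first loop of Source B: build the list of running balances starting from 1
def balancesB : List Char → Int → List Int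
  | [], _ => []
  | c :: rest, bal =>
    let bal' := bal + ((if c = '(' then (1 : Int) else 0) - (if c = ')' then 1 else 0))
    bal' :: balancesB rest bal'

-- second loop of Source B: enumerate the balances and return the index of the first zero
def goB : List Int → Nat → Option Nat
  | [], _ => none
  | b :: rest, i => if b = 0 then some i else goB rest (i + 1)

def removeParenthesis_alt (pageText : String) : String :=
  let s := pageText.toList.drop 1
  match goB (balancesB s 1) 0 with
  | some i => String.mk (s.drop (i + 1))
  | none => ""   -- Python B returns None here; excluded by Pre_

-- ===== PRECONDITION & SPEC =====
-- Pre_ excludes exactly the inputs on which the parenthesis balance of the sliced text never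
-- reaches zero, where Python A (and B) fall through the loop and return None, not a string.
def Pre_removeParenthesis (pageText : String) : Prop :=
  ∃ i ∈ List.range (pageText.toList.drop 1).length,
    ((pageText.toList.drop 1).take (i + 1)).count ')' =
      ((pageText.toList.drop 1).take (i + 1)).count '(' + 1
instance (pageText : String) : Decidable (Pre_removeParenthesis pageText) := by
  unfold Pre_removeParenthesis; infer_instance

def pvWitness_removeParenthesis : String := "(x) y"

def Spec_removeParenthesis (pageText : String) (out : String) : Prop := out = removeParenthesis_alt pageText
instance (pageText : String) (out : String) : Decidable (Spec_removeParenthesis pageText out) := by unfold Spec_removeParenthesis; infer_instance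

-- ===== CLAIM (what is proved, stated in full; the proofs are below) =====
def Claim_equal_removeParenthesis : Prop := ∀ (pageText : String), Dom_removeParenthesis pageText → Pre_removeParenthesis pageText → Spec_removeParenthesis pageText (removeParenthesis pageText)

-- ===== LEMMAS AND PROOFS =====

lemma goB_shift (l : List Int) (n : Nat) :
    goB l n = (goB l 0).map (fun i => i + n) := by
  induction l generalizing n with
  | nil => simp [goB]
  | cons b rest ih =>
    simp only [goB]
    by_cases h : b = 0
    · simp [h]
    · simp only [h]
      rw [ih (n + 1), ih 1]
      cases goB rest 0 <;> (simp; try omega)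

lemma key (s : List Char) (start fin : Int) :
    goA s start fin
      = (goB (balancesB s (start - fin)) 0).map (fun i => s.drop (i + 1)) := by
  induction s generalizing start fin with
  | nil => simp [goA, balancesB, goB]
  | cons c rest ih =>
    simp only [goA, balancesB, goB]
    have hbal : (start - fin) + ((if c = '(' then (1 : Int) else 0) - (if c = ')' then 1 else 0))
        = (if c = '(' then start + 1 else start) - (if c ≠ '(' ∧ c = ')' then fin + 1 else fin) := by
      by_cases h1 : c = '(' <;> by_cases h2 : c = ')' <;> simp [h1, h2] <;> omega
    rw [hbal]
    by_cases hz : (if c = '(' then start + 1 else start) - (if c ≠ '(' ∧ c = ')' then fin + 1 else fin) = 0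
    · have : (if c ≠ '(' ∧ c = ')' then fin + 1 else fin) = (if c = '(' then start + 1 else start) := by omega
      simp [this]
    · have hne : (if c ≠ '(' ∧ c = ')' then fin + 1 else fin) ≠ (if c = '(' then start + 1 else start) := by omega
      simp only [hz, if_neg hne]
      rw [goB_shift _ 1, ih]
      cases goB (balancesB rest _) 0 <;> simp

-- ===== VERDICT (by name: the statement is the Claim_ definition above) =====
theorem removeParenthesis_spec : Claim_equal_removeParenthesis := by
  intro pageText _ _
  unfold Spec_removeParenthesis removeParenthesis removeParenthesis_alt
  rw [key]
  have h1 : (1 : Int) - 0 = 1 := by norm_num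
  rw [h1]
  rcases h : goB (balancesB (pageText.toList.drop 1) 1) 0 with _ | i <;>
    simp only [Option.map_none, Option.map_some, List.drop_drop, h]
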